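-- pv_equiv track=rewrite | github.com/jose-cantu/MicroSeq | src/microseq_tests/assembly/overlap_utils.py | _build_aligned_strings
-- ===== SOURCE A (Python) =====
-- def _build_aligned_strings(seq_fwd: str, seq_rev: str, offset: int) -> tuple[str, str]:
--     if offset >= 0:
--         left_pad_f = 0
--         left_pad_r = offset
--     else:
--         left_pad_f = -offset
--         left_pad_r = 0
--
--     len_total = max(left_pad_f + len(seq_fwd), left_pad_r + len(seq_rev))
--
--     f_chars = ["-"] * len_total
--     r_chars = ["-"] * len_total
--     for idx, base in enumerate(seq_fwd):
--         f_chars[left_pad_f + idx] = base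
--     for idx, base in enumerate(seq_rev):
--         r_chars[left_pad_r + idx] = base
--     return "".join(f_chars), "".join(r_chars)
-- ===== SOURCE B (Python) =====
-- def _build_aligned_strings(seq_fwd: str, seq_rev: str, offset: int) -> tuple[str, str]:
--     left_pad_f, left_pad_r = (0, offset) if offset >= 0 else (-offset, 0)
--     len_total = max(left_pad_f + len(seq_fwd), left_pad_r + len(seq_rev))
--
--     def pad(left_pad, seq):
--         return "-" * left_pad + seq + "-" * (len_total - left_pad - len(seq))
--
--     return pad(left_pad_f, seq_fwd), pad(left_pad_r, seq_rev)
-- ===== Notes on version B (the rewrite author's own statement) =====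
-- stated objective: simpler
-- what changed: Replaces the mutable dash char-arrays and the two enumerate loops that write each base by index with direct string concatenation: each aligned string is left-pad dashes + sequence + right-pad dashes computed from len_total.
import Mathlib
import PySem

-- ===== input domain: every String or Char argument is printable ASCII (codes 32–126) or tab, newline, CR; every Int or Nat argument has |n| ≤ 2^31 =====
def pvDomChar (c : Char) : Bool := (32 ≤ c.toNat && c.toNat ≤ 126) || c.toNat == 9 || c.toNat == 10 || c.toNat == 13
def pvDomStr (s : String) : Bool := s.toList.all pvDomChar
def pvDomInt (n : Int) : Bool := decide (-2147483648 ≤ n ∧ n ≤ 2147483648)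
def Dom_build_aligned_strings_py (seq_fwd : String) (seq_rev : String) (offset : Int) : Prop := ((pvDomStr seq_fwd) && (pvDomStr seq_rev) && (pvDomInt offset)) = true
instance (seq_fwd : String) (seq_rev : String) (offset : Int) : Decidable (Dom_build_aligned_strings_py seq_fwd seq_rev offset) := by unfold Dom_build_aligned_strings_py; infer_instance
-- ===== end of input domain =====

-- B replaces A's mutable dash char-arrays and per-index writes by direct
-- concatenation left-pad ++ sequence ++ right-pad (objective: simpler).

-- ===== PORT A =====
-- literal transliteration: pads from the offset sign, dash arrays of length
-- len_total, each enumerate loop writes base at left_pad + idx, then join.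
def build_aligned_strings_py (seq_fwd : String) (seq_rev : String) (offset : Int) : String × String :=
  let left_pad_f : Int := if offset ≥ 0 then 0 else -offset
  let left_pad_r : Int := if offset ≥ 0 then offset else 0
  let fl := seq_fwd.toList
  let rl := seq_rev.toList
  let len_total : Int := max (left_pad_f + fl.length) (left_pad_r + rl.length)
  let f_chars := List.replicate len_total.toNat '-'
  let r_chars := List.replicate len_total.toNat '-'
  let f_chars := (PySem.List.enumerate fl).foldl
    (fun cs p => cs.set (left_pad_f + p.1).toNat p.2) f_chars
  let r_chars := (PySem.List.enumerate rl).foldl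
    (fun cs p => cs.set (left_pad_r + p.1).toNat p.2) r_chars
  (String.ofList f_chars, String.ofList r_chars)

-- ===== PORT B =====
-- literal transliteration of Source B: pads chosen as a pair from the offset sign,
-- each aligned string is left-pad dashes ++ sequence ++ right-pad dashes.
def build_aligned_strings_py_alt (seq_fwd : String) (seq_rev : String) (offset : Int) : String × String :=
  let lp : Int × Int := if offset ≥ 0 then (0, offset) else (-offset, 0)
  let len_total : Int := max (lp.1 + seq_fwd.toList.length) (lp.2 + seq_rev.toList.length)
  let pad : Int → List Char → String := fun left_pad s =>
    String.ofList (List.replicate left_pad.toNat '-' ++ s ++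
               List.replicate (len_total - left_pad - s.length).toNat '-')
  (pad lp.1 seq_fwd.toList, pad lp.2 seq_rev.toList)

-- ===== PRECONDITION & SPEC =====
def Spec_build_aligned_strings_py (seq_fwd : String) (seq_rev : String) (offset : Int) (out : String × String) : Prop := out = build_aligned_strings_py_alt seq_fwd seq_rev offset
instance (seq_fwd : String) (seq_rev : String) (offset : Int) (out : String × String) : Decidable (Spec_build_aligned_strings_py seq_fwd seq_rev offset out) := by unfold Spec_build_aligned_strings_py; infer_instance

-- ===== CLAIM (what is proved, stated in full; the proofs are below) =====
def Claim_equal_build_aligned_strings_py : Prop := ∀ (seq_fwd : String) (seq_rev : String) (offset : Int), Dom_build_aligned_strings_py seq_fwd seq_rev offset → Spec_build_aligned_strings_py seq_fwd seq_rev offset (build_aligned_strings_py seq_fwd seq_rev offset)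

-- ===== LEMMAS AND PROOFS =====

-- Writing the characters of s at positions n+st, n+st+1, … into cs splices s
-- into cs: the prefix before n+st and the suffix after n+st+s.length survive.
theorem pv_write_fold (s : List Char) : ∀ (st : Nat) (cs : List Char) (n : Nat),
    n + st + s.length ≤ cs.length →
    (PySem.List.enumerate s (st : Int)).foldl (fun acc p => acc.set (n + p.1.toNat) p.2) cs
      = cs.take (n + st) ++ s ++ cs.drop (n + st + s.length) := by
  induction s with
  | nil =>
      intro st cs n h
      simp [PySem.List.enumerate_nil]
  | cons a s ih =>
      intro st cs n h
      have hlen : n + st < cs.length := by simp at h; omega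
      have hcast : ((st : Int) + 1) = ((st + 1 : Nat) : Int) := by push_cast; ring
      rw [PySem.List.enumerate_cons, List.foldl_cons, hcast, Int.toNat_natCast,
          ih (st + 1) (cs.set (n + st) a) n (by simp; simp at h; omega)]
      have hset : cs.set (n + st) a = cs.take (n + st) ++ a :: cs.drop (n + st + 1) :=
        List.set_eq_take_cons_drop a hlen
      have htake : (cs.set (n + st) a).take (n + (st + 1)) = cs.take (n + st) ++ [a] := by
        rw [hset, List.take_append, List.take_of_length_le (by simp)]
        have h1 : n + (st + 1) - (cs.take (n + st)).length = 1 := by simp; omega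
        rw [h1]
        simp
      have hdrop : (cs.set (n + st) a).drop (n + (st + 1) + s.length)
          = cs.drop (n + st + (a :: s).length) := by
        rw [List.drop_set_of_lt (by omega)]
        congr 1
        simp; omega
      rw [htake, hdrop]
      simp

theorem pv_place (s : List Char) (lp lt : Int) (h0 : 0 ≤ lp) (h : lp + s.length ≤ lt) :
    (PySem.List.enumerate s).foldl (fun cs p => cs.set (lp + p.1).toNat p.2)
      (List.replicate lt.toNat '-')
      = List.replicate lp.toNat '-' ++ s ++ List.replicate (lt - lp - s.length).toNat '-' := by
  have hfn : (PySem.List.enumerate s).foldl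
      (fun cs p => cs.set (lp + p.1).toNat p.2) (List.replicate lt.toNat '-')
      = (PySem.List.enumerate s).foldl
      (fun cs p => cs.set (lp.toNat + p.1.toNat) p.2) (List.replicate lt.toNat '-') := by
    apply PySem.List.foldl_congr_mem
    intro acc x hx
    rcases (PySem.List.mem_enumerate_iff _ _ _).1 hx with ⟨k, hk, rfl⟩
    simp only
    congr 1
    omega
  have hw := pv_write_fold s 0 (List.replicate lt.toNat '-') lp.toNat
    (by simp; omega)
  simp only [Nat.cast_zero, Nat.add_zero] at hw
  rw [hfn, hw, List.take_replicate, List.drop_replicate]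
  congr 2 <;> congr 1 <;> omega

-- ===== VERDICT (by name: the statement is the Claim_ definition above) =====
theorem build_aligned_strings_py_spec : Claim_equal_build_aligned_strings_py := by
  intro seq_fwd seq_rev offset _
  unfold Spec_build_aligned_strings_py build_aligned_strings_py build_aligned_strings_py_alt
  by_cases hoff : offset ≥ 0 <;>
    simp only [hoff, if_pos, if_neg, not_false_iff]
  · exact Prod.ext
      (congrArg String.ofList (pv_place _ 0 _ le_rfl (le_max_left _ _)))
      (congrArg String.ofList (pv_place _ offset _ hoff (le_max_right _ _)))
  · exact Prod.ext
      (congrArg String.ofList (pv_place _ (-offset) _ (by omega) (le_max_left _ _)))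
      (congrArg String.ofList (pv_place _ 0 _ le_rfl (le_max_right _ _)))
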